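-- pv_equiv track=rewrite | github.com/agustinacf/SegundoParcialIP | jfsafj.py | verificar_transacciones
-- ===== SOURCE A (Python) =====
-- def ap_antes_corte(c: chr, s: str) -> int:
--     contador_apariciones: int = 0
--
--     for i in range(len(s)):
--         if s[i] == c:
--             contador_apariciones += 1
--         elif s[i] == "x":
--             return contador_apariciones
--     return contador_apariciones
--
-- def verificar_transacciones(s: str) -> int:
--     saldo: int = 0
--
--     for i in range(len(s)):
--         if s[i] == "x":
--             return (350 * ap_antes_corte("r", s)-(56*ap_antes_corte("v", s)))
--         elif s[i] == "v":
--             saldo -= 56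
--             if saldo < 0:
--                 saldo += 56
--                 return saldo
--         elif s[i] == "r":
--             saldo += 350
-- ===== SOURCE B (Python) =====
-- def verificar_transacciones(s: str) -> int:
--     saldo = 0
--     for ch in s:
--         if ch == "x":
--             return saldo
--         if ch == "v":
--             if saldo < 56:
--                 return saldo
--             saldo -= 56
--         elif ch == "r":
--             saldo += 350
-- ===== Notes on version B (the rewrite author's own statement) =====
-- stated objective: simpler
-- what changed: B drops the ap_antes_corte helper and its two rescans of s: a single pass keeps saldo and returns it directly at the cut character (invariant: saldo equals 350 times the count of refills minus 56 times the count of sales over the scanned prefix), and tests the balance before subtracting instead of subtracting, testing and restoring.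
-- outside the precondition, e.g. on verificar_transacciones('rv'): A returns None, B returns None
import Mathlib
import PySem

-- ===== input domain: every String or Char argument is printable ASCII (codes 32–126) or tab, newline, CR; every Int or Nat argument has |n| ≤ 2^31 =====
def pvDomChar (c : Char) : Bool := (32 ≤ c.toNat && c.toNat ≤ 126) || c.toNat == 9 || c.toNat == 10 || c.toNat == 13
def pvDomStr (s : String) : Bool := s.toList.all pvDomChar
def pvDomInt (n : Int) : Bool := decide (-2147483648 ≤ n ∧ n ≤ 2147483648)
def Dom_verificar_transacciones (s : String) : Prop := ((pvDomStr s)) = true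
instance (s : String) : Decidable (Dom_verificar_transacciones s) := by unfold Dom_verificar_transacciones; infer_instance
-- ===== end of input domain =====

-- B: one pass maintaining saldo, returning it directly at the cut character (no helper rescans) — simpler.
-- Python A returns None (not an int) when the loop falls through; Pre_ excludes exactly those inputs.


-- ===== PORT A =====
-- helper ap_antes_corte, with its accumulator contador_apariciones
def apAntesGo (c : Char) (l : List Char) (acc : Int) : Int :=
  match l with
  | [] => acc
  | ch :: t =>
    if ch = c then apAntesGo c t (acc + 1)
    else if ch = 'x' then acc
    else apAntesGo c t acc

def ap_antes_corte (c : Char) (s : List Char) : Int := apAntesGo c s 0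

-- A's loop; `none` = the Python loop falls through and returns None
def loopA (l : List Char) (full : List Char) (saldo : Int) : Option Int :=
  match l with
  | [] => none
  | ch :: t =>
    if ch = 'x' then some (350 * ap_antes_corte 'r' full - (56 * ap_antes_corte 'v' full))
    else if ch = 'v' then
      let saldo' := saldo - 56
      if saldo' < 0 then some (saldo' + 56) else loopA t full saldo'
    else if ch = 'r' then loopA t full (saldo + 350)
    else loopA t full saldo

-- outside Pre_ Python returns None, no Int; `.getD 0` only totalises the port there
def verificar_transacciones (s : String) : Int := (loopA s.toList s.toList 0).getD 0

-- ===== PORT B =====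
def loopB (l : List Char) (saldo : Int) : Option Int :=
  match l with
  | [] => none
  | ch :: t =>
    if ch = 'x' then some saldo
    else if ch = 'v' then
      if saldo < 56 then some saldo else loopB t (saldo - 56)
    else if ch = 'r' then loopB t (saldo + 350)
    else loopB t saldo

def verificar_transacciones_alt (s : String) : Int := (loopB s.toList 0).getD 0

-- ===== PRECONDITION & SPEC =====
-- Pre_ excludes exactly the inputs on which Python A falls off the loop and returns None
-- (no int): strings with no cut character and no sale position at which the balance would go negative.
def Pre_verificar_transacciones (s : String) : Prop :=
  'x' ∈ s.toList ∨
    ∃ i < s.toList.length, s.toList[i]? = some 'v' ∧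
      350 * ((s.toList.take i).count 'r' : Int) < 56 * (((s.toList.take i).count 'v' : Int) + 1)
instance (s : String) : Decidable (Pre_verificar_transacciones s) := by
  unfold Pre_verificar_transacciones; infer_instance

def pvWitness_verificar_transacciones : String := "rvx"

def Spec_verificar_transacciones (s : String) (out : Int) : Prop := out = verificar_transacciones_alt s
instance (s : String) (out : Int) : Decidable (Spec_verificar_transacciones s out) := by unfold Spec_verificar_transacciones; infer_instance

-- ===== CLAIM (what is proved, stated in full; the proofs are below) =====
def Claim_equal_verificar_transacciones : Prop := ∀ (s : String), Dom_verificar_transacciones s → Pre_verificar_transacciones s → Spec_verificar_transacciones s (verificar_transacciones s)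

-- ===== LEMMAS AND PROOFS =====

-- counting c before the first 'x' in pre ++ 'x' :: rest is just counting c in pre
lemma apAntesGo_prefix (c : Char) (hc : c ≠ 'x') (pre rest : List Char)
    (hp : 'x' ∉ pre) (acc : Int) :
    apAntesGo c (pre ++ 'x' :: rest) acc = acc + pre.count c := by
  induction pre generalizing acc with
  | nil =>
    simp [apAntesGo, Ne.symm hc]
  | cons p ps ih =>
    have hpx : p ≠ 'x' := by intro h; exact hp (by simp [h])
    have hps : 'x' ∉ ps := fun h => hp (by simp [h])
    by_cases hpc : p = c
    · simp [apAntesGo, hpc, ih hps]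
      omega
    · simp [apAntesGo, hpc, hpx, ih hps]

-- main invariant: the two loops agree when saldo is the balance of the 'x'-free prefix pre
lemma loop_eq (l : List Char) : ∀ (pre : List Char), 'x' ∉ pre →
    loopA l (pre ++ l) (350 * (pre.count 'r' : Int) - 56 * (pre.count 'v' : Int)) =
    loopB l (350 * (pre.count 'r' : Int) - 56 * (pre.count 'v' : Int)) := by
  induction l with
  | nil => intro pre _; simp [loopA, loopB]
  | cons ch t ih =>
    intro pre hp
    set saldo : Int := 350 * (pre.count 'r' : Int) - 56 * (pre.count 'v' : Int) with hs
    have hstep : ∀ d : Char, d ≠ 'x' → (pre ++ [d]) ++ t = pre ++ d :: t ∧ 'x' ∉ pre ++ [d] := by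
      intro d hd
      refine ⟨by simp, ?_⟩
      intro h
      rcases List.mem_append.1 h with h | h
      · exact hp h
      · simp at h; exact hd h.symm
    by_cases hx : ch = 'x'
    · subst hx
      have hr := apAntesGo_prefix 'r' (by decide) pre t hp 0
      have hv := apAntesGo_prefix 'v' (by decide) pre t hp 0
      simp [loopA, loopB, ap_antes_corte, hr, hv, hs]
    · by_cases hvch : ch = 'v'
      · subst hvch
        obtain ⟨he, hm⟩ := hstep 'v' (by decide)
        have hrec := ih (pre ++ ['v']) hm
        rw [he] at hrec
        have hcnt : 350 * (((pre ++ ['v']).count 'r' : ℕ) : Int) -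
            56 * (((pre ++ ['v']).count 'v' : ℕ) : Int) = saldo - 56 := by
          simp [List.count_append, hs]
          ring
        rw [hcnt] at hrec
        by_cases hlt : saldo < 56
        · have h1 : saldo - 56 < 0 := by omega
          simp [loopA, loopB, h1, hlt]
        · have h1 : ¬ (saldo - 56 < 0) := by omega
          simp only [loopA, loopB, if_neg (by decide : ¬ ('v' : Char) = 'x'),
            if_neg h1, if_neg hlt]
          exact hrec
      · by_cases hrch : ch = 'r'
        · subst hrch
          obtain ⟨he, hm⟩ := hstep 'r' (by decide)
          have hrec := ih (pre ++ ['r']) hm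
          rw [he] at hrec
          have hcnt : 350 * (((pre ++ ['r']).count 'r' : ℕ) : Int) -
              56 * (((pre ++ ['r']).count 'v' : ℕ) : Int) = saldo + 350 := by
            simp [List.count_append, hs]
            ring
          rw [hcnt] at hrec
          simpa [loopA, loopB] using hrec
        · obtain ⟨he, hm⟩ := hstep ch hx
          have hrec := ih (pre ++ [ch]) hm
          rw [he] at hrec
          have hcnt : 350 * (((pre ++ [ch]).count 'r' : ℕ) : Int) -
              56 * (((pre ++ [ch]).count 'v' : ℕ) : Int) = saldo := by
            simp [List.count_append, List.count_cons, hrch, hvch, hs]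
          rw [hcnt] at hrec
          simpa [loopA, loopB, hx, hvch, hrch] using hrec

lemma ports_agree (s : String) : verificar_transacciones s = verificar_transacciones_alt s := by
  unfold verificar_transacciones verificar_transacciones_alt
  have := loop_eq s.toList [] (by simp)
  simp at this
  rw [this]

-- ===== VERDICT (by name: the statement is the Claim_ definition above) =====
theorem verificar_transacciones_spec : Claim_equal_verificar_transacciones := by
  intro s _ _
  unfold Spec_verificar_transacciones
  exact ports_agree s
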